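-- pv_equiv track=rewrite | github.com/codigus-formacion/big-data-processing | hadoop/Football/MRTeamStatistics.py | combiner_sum_statistics
-- ===== SOURCE A (Python) =====
-- def combiner_sum_statistics(team, statistics):
--     """
--     Combina estadísticas parciales por equipo
--     """
--     total_goals = 0
--     total_assists = 0
--     total_minutes = 0
--     total_players = 0
--
--     for stats in statistics:
--         total_goals += stats['goals']
--         total_assists += stats['assists']
--         total_minutes += stats['minutes']
--         total_players += stats['players']
--
--     yield (team, {
--         'goals': total_goals,
--         'assists': total_assists,
--         'minutes': total_minutes,
--         'players': total_players
--     })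
-- ===== SOURCE B (Python) =====
-- def combiner_sum_statistics(team, statistics):
--     """
--     Combina estadisticas parciales por equipo
--     """
--     statistics = list(statistics)
--     yield (team, {key: sum(stats[key] for stats in statistics)
--                   for key in ('goals', 'assists', 'minutes', 'players')})
-- ===== Notes on version B (the rewrite author's own statement) =====
-- stated objective: alternative
-- what changed: Loop interchange: instead of A's single record-outer pass maintaining four scalar accumulators, B materialises the input once and makes one independent per-key summation pass (key-outer, sum over records) per statistic, building the result dict by comprehension.
-- outside the precondition, e.g. on combiner_sum_statistics('x', [{'goals': 1}]): A raises KeyError, B raises KeyError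
import Mathlib
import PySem

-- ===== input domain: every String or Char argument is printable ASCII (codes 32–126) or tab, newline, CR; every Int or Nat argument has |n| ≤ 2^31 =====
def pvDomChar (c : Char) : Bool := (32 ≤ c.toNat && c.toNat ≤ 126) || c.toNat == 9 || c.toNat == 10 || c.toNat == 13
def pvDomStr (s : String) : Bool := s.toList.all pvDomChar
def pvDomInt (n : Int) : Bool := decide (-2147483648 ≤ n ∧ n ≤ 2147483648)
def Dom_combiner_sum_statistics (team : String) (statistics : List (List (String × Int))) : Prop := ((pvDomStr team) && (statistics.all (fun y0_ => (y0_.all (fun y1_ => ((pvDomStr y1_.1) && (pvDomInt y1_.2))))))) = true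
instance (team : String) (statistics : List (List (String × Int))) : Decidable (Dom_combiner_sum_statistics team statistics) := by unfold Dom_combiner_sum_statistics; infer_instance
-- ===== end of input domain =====

-- B interchanges the loops: instead of A's single record-outer pass with four scalar
-- accumulators, it makes one independent summation pass over the records per key
-- (key-outer) and builds the result dict by comprehension; same O(n) cost.


-- ===== PORT A =====
-- single record-outer pass over four scalar accumulators, dict built at the end
def combiner_sum_statistics (team : String) (statistics : List (List (String × Int))) : List (String × (List (String × Int))) :=
  let t := statistics.foldl
    (fun (acc : Int × Int × Int × Int) stats =>
      (acc.1 + (PySem.Dict.mk stats).getD "goals" 0,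
       acc.2.1 + (PySem.Dict.mk stats).getD "assists" 0,
       acc.2.2.1 + (PySem.Dict.mk stats).getD "minutes" 0,
       acc.2.2.2 + (PySem.Dict.mk stats).getD "players" 0))
    (0, 0, 0, 0)
  [(team, [("goals", t.1), ("assists", t.2.1), ("minutes", t.2.2.1), ("players", t.2.2.2)])]

-- ===== PORT B =====
-- key-outer: one independent summation pass over the records per key (dict comprehension)
def combiner_sum_statistics_alt (team : String) (statistics : List (List (String × Int))) : List (String × (List (String × Int))) :=
  [(team,
    ["goals", "assists", "minutes", "players"].map
      (fun key =>
        (key, statistics.foldl (fun (acc : Int) stats => acc + (PySem.Dict.mk stats).getD key 0) 0)))]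

-- ===== PRECONDITION & SPEC =====
-- Pre_ excludes exactly the inputs where Python A raises KeyError: some per-player dict lacks one of the four keys.
def Pre_combiner_sum_statistics (team : String) (statistics : List (List (String × Int))) : Prop :=
  ∀ stats ∈ statistics, "goals" ∈ stats.map (·.1) ∧ "assists" ∈ stats.map (·.1) ∧ "minutes" ∈ stats.map (·.1) ∧ "players" ∈ stats.map (·.1)
instance (team : String) (statistics : List (List (String × Int))) : Decidable (Pre_combiner_sum_statistics team statistics) := by unfold Pre_combiner_sum_statistics; infer_instance
def pvWitness_combiner_sum_statistics : String × (List (List (String × Int))) :=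
  ("Team A", [[("goals", 2), ("assists", 1), ("minutes", 90), ("players", 1)], [("goals", 0), ("assists", 3), ("minutes", 45), ("players", 2)]])

def Spec_combiner_sum_statistics (team : String) (statistics : List (List (String × Int))) (out : List (String × (List (String × Int)))) : Prop := out = combiner_sum_statistics_alt team statistics
instance (team : String) (statistics : List (List (String × Int))) (out : List (String × (List (String × Int)))) : Decidable (Spec_combiner_sum_statistics team statistics out) := by unfold Spec_combiner_sum_statistics; infer_instance

-- ===== CLAIM (what is proved, stated in full; the proofs are below) =====
def Claim_equal_combiner_sum_statistics : Prop := ∀ (team : String) (statistics : List (List (String × Int))), Dom_combiner_sum_statistics team statistics → Pre_combiner_sum_statistics team statistics → Spec_combiner_sum_statistics team statistics (combiner_sum_statistics team statistics)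

-- ===== LEMMAS AND PROOFS =====
-- A's fused four-accumulator fold equals the four independent per-key folds of B
theorem fold_fission (statistics : List (List (String × Int))) (g a m p : Int) :
    (statistics.foldl
      (fun (acc : Int × Int × Int × Int) stats =>
        (acc.1 + (PySem.Dict.mk stats).getD "goals" 0,
         acc.2.1 + (PySem.Dict.mk stats).getD "assists" 0,
         acc.2.2.1 + (PySem.Dict.mk stats).getD "minutes" 0,
         acc.2.2.2 + (PySem.Dict.mk stats).getD "players" 0))
      (g, a, m, p)) =
    (statistics.foldl (fun (acc : Int) stats => acc + (PySem.Dict.mk stats).getD "goals" 0) g,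
     statistics.foldl (fun (acc : Int) stats => acc + (PySem.Dict.mk stats).getD "assists" 0) a,
     statistics.foldl (fun (acc : Int) stats => acc + (PySem.Dict.mk stats).getD "minutes" 0) m,
     statistics.foldl (fun (acc : Int) stats => acc + (PySem.Dict.mk stats).getD "players" 0) p) := by
  induction statistics generalizing g a m p with
  | nil => rfl
  | cons stats rest ih => simp only [List.foldl_cons, ih]

-- ===== VERDICT (by name: the statement is the Claim_ definition above) =====
theorem combiner_sum_statistics_spec : Claim_equal_combiner_sum_statistics := by
  intro team statistics _ _
  unfold Spec_combiner_sum_statistics combiner_sum_statistics combiner_sum_statistics_alt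
  rw [fold_fission]
  rfl
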